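-- pv_equiv track=rewrite | github.com/Xerophayze/XeroFlow | nodes/outline_writerv3_node.py | clean_for_prompt
-- ===== SOURCE A (Python) =====
-- def clean_for_prompt(data):
--     """Clean accumulated data before using it in the next prompt - removes title but keeps chapters."""
--     if not data:
--         return ""
--
--     lines = data.split('\n')
--     chapter_idx = -1
--
--     # Find the first chapter
--     for i, line in enumerate(lines):
--         if line.startswith("Chapter"):
--             chapter_idx = i
--             break
--
--     if chapter_idx != -1:
--         return '\n'.join(lines[chapter_idx:]).strip()
--     return data.strip()
-- ===== SOURCE B (Python) =====
-- def clean_for_prompt(data):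
--     """Clean accumulated data before using it in the next prompt - removes title but keeps chapters."""
--     if not data:
--         return ""
--     if data.startswith("Chapter"):
--         return data.strip()
--     j = data.find("\nChapter")
--     if j != -1:
--         return data[j + 1:].strip()
--     return data.strip()
-- ===== Notes on version B (the rewrite author's own statement) =====
-- stated objective: idiomatic
-- what changed: B drops the split-into-lines list and the indexed scan entirely: it keeps the empty guard, tests whether the text itself begins with the chapter keyword, otherwise locates the first newline-anchored occurrence of the keyword with one substring find and returns the slice from just after that newline, stripped.
import Mathlib
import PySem

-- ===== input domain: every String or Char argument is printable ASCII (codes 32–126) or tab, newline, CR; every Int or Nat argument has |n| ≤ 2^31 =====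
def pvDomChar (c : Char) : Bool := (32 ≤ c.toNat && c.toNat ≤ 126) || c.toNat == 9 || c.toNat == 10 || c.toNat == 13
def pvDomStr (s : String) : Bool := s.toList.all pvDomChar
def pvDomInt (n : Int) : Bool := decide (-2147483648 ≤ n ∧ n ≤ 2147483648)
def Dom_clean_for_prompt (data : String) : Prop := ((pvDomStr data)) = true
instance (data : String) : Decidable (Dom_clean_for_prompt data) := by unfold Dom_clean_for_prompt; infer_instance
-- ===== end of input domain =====

-- B replaces A's split-into-lines-and-scan with a direct substring search for "\nChapter"
-- (plus a startswith check for the first line) and one slice; same return value, no line list built.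

-- ===== PORT A =====
-- the 'for i, line in enumerate(lines): if line.startswith("Chapter"): chapter_idx = i; break' loop
def pvFindChap : List String → Int → Int
  | [], _ => -1
  | l :: rest, i => if PySem.Str.startswith l "Chapter" then i else pvFindChap rest (i + 1)

def clean_for_prompt (data : String) : String :=
  if data = "" then ""
  else
    let lines := (PySem.Str.split? data "\n").getD []   -- sep ≠ "", so split? is always some
    let chapter_idx := pvFindChap lines 0
    if chapter_idx ≠ -1 then
      PySem.Str.strip (PySem.Str.join "\n" (PySem.List.slice lines (some chapter_idx) none))
    else PySem.Str.strip data

-- ===== PORT B =====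
def clean_for_prompt_alt (data : String) : String :=
  if data = "" then ""
  else if PySem.Str.startswith data "Chapter" then PySem.Str.strip data
  else
    let j := PySem.Str.find data "\nChapter"
    if j ≠ -1 then PySem.Str.strip (PySem.Str.slice data (some (j + 1)) none)
    else PySem.Str.strip data

-- ===== PRECONDITION & SPEC =====
def Spec_clean_for_prompt (data : String) (out : String) : Prop := out = clean_for_prompt_alt data
instance (data : String) (out : String) : Decidable (Spec_clean_for_prompt data out) := by unfold Spec_clean_for_prompt; infer_instance

-- ===== CLAIM (what is proved, stated in full; the proofs are below) =====
def Claim_equal_clean_for_prompt : Prop := ∀ (data : String), Dom_clean_for_prompt data → Spec_clean_for_prompt data (clean_for_prompt data)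

-- ===== LEMMAS AND PROOFS =====

-- reference model of str.split('\n')
def pvConsHead (p : List Char) : List (List Char) → List (List Char)
  | [] => [p]
  | x :: xs => (p ++ x) :: xs

def pvSplitNl : List Char → List (List Char)
  | [] => [[]]
  | c :: t => if c = '\n' then [] :: pvSplitNl t else pvConsHead [c] (pvSplitNl t)

-- index of the first line starting with "Chapter"
def pvChapIdx : List (List Char) → Option Nat
  | [] => none
  | l :: rest => if ("Chapter".toList).isPrefixOf l = true then some 0 else (pvChapIdx rest).map (· + 1)

-- scan for the first "\nChapter" occurrence, returning the suffix after that newline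
def pvAux : List Char → Option (List Char)
  | [] => none
  | c :: t => if c = '\n' ∧ ("Chapter".toList).isPrefixOf t = true then some t else pvAux t

-- common reference: the suffix of cs from its first line that starts with "Chapter" (none if there is none)
def pvChapTail (cs : List Char) : Option (List Char) :=
  if ("Chapter".toList).isPrefixOf cs = true then some cs else pvAux cs

theorem pvConsHead_consHead (p q : List Char) (L : List (List Char)) :
    pvConsHead p (pvConsHead q L) = pvConsHead (p ++ q) L := by
  cases L <;> simp [pvConsHead]

theorem pvGo_nil (cur : List Char) (acc : List (List Char)) (fuel : Nat) :
    PySem.Chars.splitOn.go ['\n'] (fuel + 1) [] cur acc = (cur.reverse :: acc).reverse := by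
  simp [PySem.Chars.splitOn.go]

theorem pvGo_nl (cur : List Char) (acc : List (List Char)) (fuel : Nat) (rest : List Char) :
    PySem.Chars.splitOn.go ['\n'] (fuel + 1) ('\n' :: rest) cur acc
      = PySem.Chars.splitOn.go ['\n'] fuel rest [] (cur.reverse :: acc) := by
  simp [PySem.Chars.splitOn.go]

theorem pvGo_other (cur : List Char) (acc : List (List Char)) (fuel : Nat) (c : Char)
    (rest : List Char) (h : ¬ c = '\n') :
    PySem.Chars.splitOn.go ['\n'] (fuel + 1) (c :: rest) cur acc
      = PySem.Chars.splitOn.go ['\n'] fuel rest (c :: cur) acc := by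
  simp [PySem.Chars.splitOn.go, List.isPrefixOf, h]
  exact fun h' => absurd h'.symm h

theorem pvSplitNl_ne_nil (cs : List Char) : pvSplitNl cs ≠ [] := by
  cases cs with
  | nil => simp [pvSplitNl]
  | cons c t =>
    rw [pvSplitNl]
    split
    · simp
    · cases pvSplitNl t <;> simp [pvConsHead]

theorem pvGo_spec (l : List Char) : ∀ (fuel : Nat) (cur : List Char) (acc : List (List Char)),
    l.length < fuel →
    PySem.Chars.splitOn.go ['\n'] fuel l cur acc = acc.reverse ++ pvConsHead cur.reverse (pvSplitNl l) := by
  induction l with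
  | nil =>
    intro fuel cur acc h
    obtain ⟨f, rfl⟩ : ∃ f, fuel = f + 1 := ⟨fuel - 1, by omega⟩
    simp [pvGo_nil, pvSplitNl, pvConsHead]
  | cons c t ih =>
    intro fuel cur acc h
    obtain ⟨f, rfl⟩ : ∃ f, fuel = f + 1 := ⟨fuel - 1, by omega⟩
    by_cases hc : c = '\n'
    · subst hc
      rw [pvGo_nl, ih f [] (cur.reverse :: acc) (by simpa using h)]
      simp only [pvSplitNl, if_pos rfl]
      cases hs : pvSplitNl t with
      | nil => exact absurd hs (pvSplitNl_ne_nil t)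
      | cons x xs => simp [pvConsHead]
    · rw [pvGo_other _ _ _ _ _ hc, ih f (c :: cur) acc (by simpa using h)]
      simp [pvSplitNl, hc, pvConsHead_consHead]

theorem pvSplitOn_eq (cs : List Char) : PySem.Chars.splitOn cs ['\n'] = pvSplitNl cs := by
  show PySem.Chars.splitOn.go ['\n'] (cs.length + 1) cs [] [] = _
  rw [pvGo_spec cs (cs.length + 1) [] [] (by omega)]
  cases hs : pvSplitNl cs with
  | nil => exact absurd hs (pvSplitNl_ne_nil cs)
  | cons x xs => simp [pvConsHead]

theorem pvSplitNl_no_nl (l : List Char) (h : '\n' ∉ l) : pvSplitNl l = [l] := by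
  induction l with
  | nil => rfl
  | cons c t ih =>
    have hc : ¬ c = '\n' := fun hc => h (hc ▸ List.mem_cons_self)
    rw [pvSplitNl, if_neg hc, ih (fun hm => h (List.mem_cons_of_mem c hm))]
    rfl

theorem pvSplitNl_append (l rest : List Char) (h : '\n' ∉ l) :
    pvSplitNl (l ++ '\n' :: rest) = l :: pvSplitNl rest := by
  induction l with
  | nil => simp [pvSplitNl]
  | cons c t ih =>
    have hc : ¬ c = '\n' := fun hc => h (hc ▸ List.mem_cons_self)
    rw [List.cons_append, pvSplitNl, if_neg hc, ih (fun hm => h (List.mem_cons_of_mem c hm))]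
    rfl

theorem pvJoin_splitNl (cs : List Char) : PySem.Chars.join ['\n'] (pvSplitNl cs) = cs := by
  induction cs with
  | nil => simp [pvSplitNl, PySem.Chars.join_singleton]
  | cons c t ih =>
    by_cases hc : c = '\n'
    · subst hc
      rw [pvSplitNl, if_pos rfl]
      cases hs : pvSplitNl t with
      | nil => exact absurd hs (pvSplitNl_ne_nil t)
      | cons x xs =>
        rw [PySem.Chars.join_cons_cons]
        rw [hs] at ih
        simp [ih]
    · rw [pvSplitNl, if_neg hc]
      cases hs : pvSplitNl t with
      | nil => exact absurd hs (pvSplitNl_ne_nil t)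
      | cons x xs =>
        rw [hs] at ih
        cases xs with
        | nil =>
          rw [PySem.Chars.join_singleton] at ih
          simp [pvConsHead, PySem.Chars.join_singleton, ih]
        | cons y ys =>
          rw [PySem.Chars.join_cons_cons] at ih
          simp [pvConsHead, PySem.Chars.join_cons_cons, ← ih]

-- a newline-free pattern is a prefix of l ++ '\n'::rest iff it is a prefix of l
theorem pvPrefix_append_nl (p : List Char) (hp : '\n' ∉ p) :
    ∀ (l rest : List Char), (p <+: l ++ '\n' :: rest ↔ p <+: l) := by
  induction p with
  | nil => intro l rest; simp
  | cons a p' ih =>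
    intro l rest
    have ha : ¬ a = '\n' := fun h => hp (h ▸ List.mem_cons_self)
    cases l with
    | nil =>
      simp only [List.nil_append, List.cons_prefix_cons]
      constructor
      · rintro ⟨h1, _⟩; exact absurd h1 ha
      · intro h; exact absurd (List.eq_nil_of_prefix_nil h) (by simp)
    | cons b l' =>
      simp only [List.cons_append, List.cons_prefix_cons]
      constructor
      · rintro ⟨h1, h2⟩; exact ⟨h1, (ih (fun hm => hp (List.mem_cons_of_mem a hm)) l' rest).mp h2⟩
      · rintro ⟨h1, h2⟩; exact ⟨h1, (ih (fun hm => hp (List.mem_cons_of_mem a hm)) l' rest).mpr h2⟩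

theorem pvChapNoNl : '\n' ∉ "Chapter".toList := by decide

theorem pvAux_no_nl (cs : List Char) (h : '\n' ∉ cs) : pvAux cs = none := by
  induction cs with
  | nil => rfl
  | cons c t ih =>
    have hc : ¬ c = '\n' := fun hc => h (hc ▸ List.mem_cons_self)
    rw [pvAux, if_neg (fun hco => hc hco.1)]
    exact ih (fun hm => h (List.mem_cons_of_mem c hm))

theorem pvAux_append (l rest : List Char) (h : '\n' ∉ l) :
    pvAux (l ++ '\n' :: rest)
      = if ("Chapter".toList).isPrefixOf rest then some rest else pvAux rest := by
  induction l with
  | nil =>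
    simp only [List.nil_append, pvAux]
    by_cases hr : ("Chapter".toList).isPrefixOf rest <;> simp [hr]
  | cons c t ih =>
    have hc : ¬ c = '\n' := fun hc => h (hc ▸ List.mem_cons_self)
    rw [List.cons_append, pvAux, if_neg (fun hco => hc hco.1)]
    exact ih (fun hm => h (List.mem_cons_of_mem c hm))

-- ---- relating pvAux to Chars.find "\nChapter" ----

theorem pvPat_cons : ("\nChapter".toList) = '\n' :: "Chapter".toList := by decide

theorem pvFind_eq_of (s sub : List Char) (j : Nat) (h1 : sub <+: s.drop j)
    (h2 : ∀ i, i < j → ¬ sub <+: s.drop i) : PySem.Chars.find s sub = (j : Int) := by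
  have hin : sub <:+: s := h1.isInfix.trans (List.drop_suffix j s).isInfix
  have h0 : 0 ≤ PySem.Chars.find s sub := (PySem.Chars.find_nonneg_iff s sub).mpr hin
  obtain ⟨hp, hmin⟩ := PySem.Chars.find_spec h0
  have : (PySem.Chars.find s sub).toNat = j := by
    rcases Nat.lt_trichotomy (PySem.Chars.find s sub).toNat j with h | h | h
    · exact absurd hp (h2 _ h)
    · exact h
    · exact absurd h1 (hmin j h)
  omega

theorem pvFind_neg_iff (s sub : List Char) :
    PySem.Chars.find s sub = -1 ↔ ∀ j, ¬ sub <+: s.drop j := by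
  rw [PySem.Chars.find_eq_neg_one_iff, ← PySem.Chars.isIn_iff_infix,
    ← PySem.Chars.exists_prefix_drop_iff_isIn]
  push_neg
  rfl

theorem pvAux_none_iff (cs : List Char) :
    pvAux cs = none ↔ ∀ j, ¬ ('\n' :: "Chapter".toList) <+: cs.drop j := by
  induction cs with
  | nil =>
    simp only [pvAux, List.drop_nil, true_iff]
    intro j h
    exact absurd (List.eq_nil_of_prefix_nil h) (by simp)
  | cons c t ih =>
    by_cases hcond : c = '\n' ∧ ("Chapter".toList).isPrefixOf t
    · rw [pvAux, if_pos hcond]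
      simp only [false_iff, not_forall, reduceCtorEq]
      push_neg
      refine ⟨0, ?_⟩
      simp only [List.drop_zero, List.cons_prefix_cons]
      exact ⟨hcond.1.symm, List.isPrefixOf_iff_prefix.mp hcond.2⟩
    · rw [pvAux, if_neg hcond, ih]
      constructor
      · intro h j
        cases j with
        | zero =>
          simp only [List.drop_zero, List.cons_prefix_cons, not_and]
          intro he hpre
          exact hcond ⟨he.symm, List.isPrefixOf_iff_prefix.mpr hpre⟩
        | succ j' => simpa using h j'
      · intro h j
        simpa using h (j + 1)

theorem pvAux_some_spec (cs : List Char) : ∀ (t : List Char), pvAux cs = some t →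
    ∃ j, ('\n' :: "Chapter".toList) <+: cs.drop j
      ∧ (∀ i, i < j → ¬ ('\n' :: "Chapter".toList) <+: cs.drop i)
      ∧ t = cs.drop (j + 1) := by
  induction cs with
  | nil => intro t h; simp [pvAux] at h
  | cons c cs' ih =>
    intro t h
    by_cases hcond : c = '\n' ∧ ("Chapter".toList).isPrefixOf cs'
    · rw [pvAux, if_pos hcond] at h
      refine ⟨0, ?_, by omega, by simpa using h.symm⟩
      simp only [List.drop_zero, List.cons_prefix_cons]
      exact ⟨hcond.1.symm, List.isPrefixOf_iff_prefix.mp hcond.2⟩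
    · rw [pvAux, if_neg hcond] at h
      obtain ⟨j, hj1, hj2, hj3⟩ := ih t h
      refine ⟨j + 1, by simpa using hj1, ?_, by simpa using hj3⟩
      intro i hi
      cases i with
      | zero =>
        simp only [List.drop_zero, List.cons_prefix_cons, not_and]
        intro he hpre
        exact hcond ⟨he.symm, List.isPrefixOf_iff_prefix.mpr hpre⟩
      | succ i' =>
        simpa using hj2 i' (by omega)

theorem pvFind_aux (cs : List Char) :
    (if PySem.Chars.find cs ('\n' :: "Chapter".toList) = -1 then none
     else some (cs.drop (PySem.Chars.find cs ('\n' :: "Chapter".toList) + 1).toNat))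
      = pvAux cs := by
  cases ha : pvAux cs with
  | none =>
    rw [if_pos ((pvFind_neg_iff _ _).mpr ((pvAux_none_iff cs).mp ha))]
  | some t =>
    obtain ⟨j, hj1, hj2, hj3⟩ := pvAux_some_spec cs t ha
    rw [pvFind_eq_of cs _ j hj1 hj2, if_neg (by omega), hj3]
    norm_num

-- ---- relating A's line scan to pvChapTail ----

theorem pvDecomp (cs : List Char) :
    '\n' ∉ cs ∨ ∃ l rest, cs = l ++ '\n' :: rest ∧ '\n' ∉ l := by
  induction cs with
  | nil => left; simp
  | cons c t ih =>
    by_cases hc : c = '\n'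
    · right; exact ⟨[], t, by simp [hc], by simp⟩
    · rcases ih with h | ⟨l, rest, hrw, hl⟩
      · left
        intro hm
        rcases List.mem_cons.mp hm with h' | h'
        · exact hc h'.symm
        · exact h h'
      · right
        refine ⟨c :: l, rest, by simp [hrw], ?_⟩
        intro hm
        rcases List.mem_cons.mp hm with h' | h'
        · exact hc h'.symm
        · exact hl h'

theorem pvLA (n : Nat) : ∀ (cs : List Char), cs.length ≤ n →
    (pvChapIdx (pvSplitNl cs)).map (fun k => PySem.Chars.join ['\n'] ((pvSplitNl cs).drop k))
      = pvChapTail cs := by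
  induction n with
  | zero =>
    intro cs hlen
    have : cs = [] := List.eq_nil_of_length_eq_zero (by omega)
    subst this
    simp [pvSplitNl, pvChapIdx, pvChapTail, pvAux, List.isPrefixOf]
  | succ n ih =>
    intro cs hlen
    by_cases hp : ("Chapter".toList).isPrefixOf cs
    · have h0 : pvChapIdx (pvSplitNl cs) = some 0 := by
        rcases pvDecomp cs with h | ⟨l, rest, hrw, hl⟩
        · rw [pvSplitNl_no_nl cs h, pvChapIdx, if_pos hp]
        · subst hrw
          rw [pvSplitNl_append l rest hl, pvChapIdx, if_pos]
          exact List.isPrefixOf_iff_prefix.mpr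
            ((pvPrefix_append_nl _ pvChapNoNl l rest).mp (List.isPrefixOf_iff_prefix.mp hp))
      rw [h0, pvChapTail, if_pos hp]
      simp [pvJoin_splitNl]
    · rw [pvChapTail, if_neg hp]
      rcases pvDecomp cs with h | ⟨l, rest, hrw, hl⟩
      · rw [pvSplitNl_no_nl cs h, pvAux_no_nl cs h, pvChapIdx, if_neg hp]
        simp [pvChapIdx]
      · subst hrw
        have hnl : ¬ ("Chapter".toList).isPrefixOf l := by
          intro hpre
          exact hp (List.isPrefixOf_iff_prefix.mpr
            ((List.isPrefixOf_iff_prefix.mp hpre).trans (l.prefix_append _)))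
        rw [pvSplitNl_append l rest hl, pvAux_append l rest hl, pvChapIdx, if_neg hnl]
        have hrest : rest.length ≤ n := by
          simp [List.length_append] at hlen
          omega
        have := ih rest hrest
        rw [pvChapTail] at this
        by_cases hpr : ("Chapter".toList).isPrefixOf rest
        · rw [if_pos hpr]
          rw [if_pos hpr] at this
          rw [← this]
          cases hidx : pvChapIdx (pvSplitNl rest) with
          | none => simp [hidx] at this
          | some k => simp [hidx]
        · rw [if_neg hpr]
          rw [if_neg hpr] at this
          rw [← this]
          cases hidx : pvChapIdx (pvSplitNl rest) with
          | none => simp [hidx]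
          | some k => simp [hidx]

-- ---- string-level assembly ----

theorem pvFindChap_eq (L : List (List Char)) : ∀ (i : Int),
    pvFindChap (L.map String.ofList) i
      = (pvChapIdx L).elim (-1) (fun k => i + k) := by
  induction L with
  | nil => intro i; rfl
  | cons l rest ih =>
    intro i
    have hsw : PySem.Str.startswith (String.ofList l) "Chapter" = ("Chapter".toList).isPrefixOf l := by
      rw [PySem.Str.startswith, PySem.Chars.startswith]
      congr 1
      exact String.toList_ofList
    by_cases hp : ("Chapter".toList).isPrefixOf l = true
    · rw [List.map_cons, pvFindChap, if_pos (by rw [hsw]; exact hp), pvChapIdx, if_pos hp]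
      simp
    · rw [List.map_cons, pvFindChap, if_neg (by rw [hsw]; exact hp), ih (i + 1),
        pvChapIdx, if_neg hp]
      cases pvChapIdx rest with
      | none => rfl
      | some k =>
        simp only [Option.map_some, Option.elim_some]
        push_cast
        ring

theorem pvStrip_ofList (x : List Char) :
    PySem.Str.strip (String.ofList x) = String.ofList (PySem.Chars.strip x) := by
  rw [PySem.Str.strip]
  congr 1
  congr 1
  exact String.toList_ofList

theorem pvJoin_map (L : List (List Char)) (k : Nat) :
    PySem.Str.join "\n" ((L.map String.ofList).drop k)
      = String.ofList (PySem.Chars.join ['\n'] (L.drop k)) := by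
  rw [PySem.Str.join]
  congr 1
  rw [show "\n".toList = ['\n'] from rfl]
  congr 1
  rw [← List.map_drop]
  simp [Function.comp_def]

theorem pvA_eq (data : String) (hd : ¬ data = "") :
    clean_for_prompt data =
      match pvChapTail data.toList with
      | some t => String.ofList (PySem.Chars.strip t)
      | none => PySem.Str.strip data := by
  have hlines : (PySem.Str.split? data "\n").getD [] = (pvSplitNl data.toList).map String.ofList := by
    simp [PySem.Str.split?, PySem.Chars.split?, pvSplitOn_eq]
  rw [clean_for_prompt, if_neg hd]
  simp only [hlines, pvFindChap_eq]
  have hLA := pvLA data.toList.length data.toList le_rfl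
  cases hidx : pvChapIdx (pvSplitNl data.toList) with
  | none =>
    rw [hidx] at hLA
    simp only [Option.map_none] at hLA
    rw [← hLA]
    simp only [hidx, Option.elim_none]
    simp
  | some k =>
    rw [hidx] at hLA
    simp only [Option.map_some] at hLA
    rw [← hLA]
    simp only [hidx, Option.elim_some]
    rw [if_pos (show ¬ ((0:Int) + k = -1) by omega)]
    rw [show ((0:Int) + k) = ((k : Nat) : Int) by omega]
    rw [PySem.List.slice_from_natCast]
    rw [pvJoin_map, pvStrip_ofList]

theorem pvB_eq (data : String) (hd : ¬ data = "") :
    clean_for_prompt_alt data =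
      match pvChapTail data.toList with
      | some t => String.ofList (PySem.Chars.strip t)
      | none => PySem.Str.strip data := by
  rw [clean_for_prompt_alt, if_neg hd]
  have hsw : PySem.Str.startswith data "Chapter" = ("Chapter".toList).isPrefixOf data.toList := rfl
  have hfind : PySem.Str.find data "\nChapter"
      = PySem.Chars.find data.toList ('\n' :: "Chapter".toList) := by
    rw [PySem.Str.find, pvPat_cons]
  by_cases hp : ("Chapter".toList).isPrefixOf data.toList = true
  · rw [if_pos (by rw [hsw]; exact hp), pvChapTail, if_pos hp]
    rfl
  · rw [if_neg (by rw [hsw]; exact hp), pvChapTail, if_neg hp]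
    have hFA := pvFind_aux data.toList
    cases ha : pvAux data.toList with
    | none =>
      rw [ha] at hFA
      have hneg : PySem.Chars.find data.toList ('\n' :: "Chapter".toList) = -1 := by
        by_contra hne
        rw [if_neg hne] at hFA
        simp at hFA
      simp only [hfind, hneg]
      simp
    | some t =>
      rw [ha] at hFA
      have hne : PySem.Chars.find data.toList ('\n' :: "Chapter".toList) ≠ -1 := by
        intro h0
        rw [if_pos h0] at hFA
        simp at hFA
      rw [if_neg hne] at hFA
      have h0 : (0:Int) ≤ PySem.Chars.find data.toList ('\n' :: "Chapter".toList) := by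
        have := PySem.Chars.neg_one_le_find data.toList ('\n' :: "Chapter".toList)
        omega
      simp only [hfind, if_pos hne]
      have hslice : PySem.Str.slice data
          (some (PySem.Chars.find data.toList ('\n' :: "Chapter".toList) + 1)) none
          = String.ofList (data.toList.drop
              (PySem.Chars.find data.toList ('\n' :: "Chapter".toList) + 1).toNat) := by
        rw [PySem.Str.slice]
        congr 1
        rw [PySem.Chars.slice_eq_listSlice]
        exact PySem.List.slice_from data.toList (by omega)
      rw [hslice, pvStrip_ofList]
      rw [Option.some_inj.mp hFA]

theorem pvMain (data : String) : clean_for_prompt data = clean_for_prompt_alt data := by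
  by_cases hd : data = ""
  · simp [clean_for_prompt, clean_for_prompt_alt, hd]
  · rw [pvA_eq data hd, pvB_eq data hd]

-- ===== VERDICT (by name: the statement is the Claim_ definition above) =====
theorem clean_for_prompt_spec : Claim_equal_clean_for_prompt := by
  intro data _
  unfold Spec_clean_for_prompt
  exact pvMain data
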